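-- pv_equiv track=rewrite | github.com/PRV47/Parcial2_Python_Mutantes | Mutantes.py | isMutant
-- ===== SOURCE A (Python) =====
-- def isMutant(dna):
--     num_filas = len(dna)
--     num_columnas = len(dna[0])
--     contador = 0
--
--     #Chequea la matriz de forma horizontal y vertical
--     for fila in dna:
--         for i in range(num_columnas -3):
--             if fila [i] == fila [i + 1] == fila [i + 2] == fila [i + 3]:
--                 contador += 1
--
--     for i in range(num_columnas):
--         columna = ''
--         for fila in dna:
--             columna += fila[i]
--
--         for j in range(num_filas -3):
--             if columna[j] == columna[j + 1] == columna[j + 2] == columna[j + 3]: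
--                 contador += 1
--
--     #Chequea la matriz de forma diagonal, izquierda a derecha
--     for i in range(num_filas -3):
--         for j in range(num_columnas -3):
--             if dna[i][j] == dna[i + 1][j + 1] == dna[i + 2][j + 2] == dna[i + 3][j + 3]:
--                 contador += 1
--
--     #Chequea la matriz de forma diagonal, derecha a izquierda
--     for i in range(num_filas -3):
--         for j in range(num_columnas - 1, 2, -1):
--             if dna[i][j] == dna[i + 1][j - 1] == dna[i + 2][j - 2] == dna[i + 3][j - 3]:
--                 contador += 1
--
--     #Si el contador cuenta más de 1 caso, devuelve un True para el caso mutante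
--     return contador > 1
-- ===== SOURCE B (Python) =====
-- def isMutant(dna):
--     rows = len(dna)
--     cols = len(dna[0])
--     count = 0
--     for i in range(rows):
--         for j in range(cols):
--             for (dr, dc) in ((0, 1), (1, 0), (1, 1), (1, -1)):
--                 if 0 <= i + 3 * dr < rows and 0 <= j + 3 * dc < cols:
--                     c = dna[i][j]
--                     if all(dna[i + k * dr][j + k * dc] == c for k in (1, 2, 3)):
--                         count += 1
--     return count > 1
-- ===== Notes on version B (the rewrite author's own statement) =====
-- stated objective: simpler
-- what changed: B replaces A's four separate passes (including building each column as a string by concatenation) with a single delta-indexed traversal: one loop over every cell and a fixed direction list [(0,1),(1,0),(1,1),(1,-1)], checking bounds and the four cells per direction and incrementing one counter.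
import Mathlib
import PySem

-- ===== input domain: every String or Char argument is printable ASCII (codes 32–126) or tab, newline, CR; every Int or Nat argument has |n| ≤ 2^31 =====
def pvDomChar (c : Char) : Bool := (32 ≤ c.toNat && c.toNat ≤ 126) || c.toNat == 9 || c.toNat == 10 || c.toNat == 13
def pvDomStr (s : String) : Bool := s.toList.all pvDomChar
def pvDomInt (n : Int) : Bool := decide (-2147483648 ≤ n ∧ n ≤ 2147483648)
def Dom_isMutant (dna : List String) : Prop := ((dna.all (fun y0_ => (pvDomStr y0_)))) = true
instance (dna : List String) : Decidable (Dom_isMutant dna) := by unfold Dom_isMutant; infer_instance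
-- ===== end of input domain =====

-- B unifies A's four window scans into one cell×direction traversal; objective: simpler.
-- Both ports index characters with List.getD (default ' '), exact for the in-range accesses reached under Pre_.

-- ===== PORT A =====
def isMutant (dna : List String) : Bool :=
  let numFilas := dna.length
  let numColumnas := (dna.headD "").length   -- len(dna[0]); dna ≠ [] under Pre_
  let contador : Int := 0
  -- horizontal
  let contador := dna.foldl (fun c fila =>
    (List.range (numColumnas - 3)).foldl (fun c i =>
      if fila.toList.getD i ' ' = fila.toList.getD (i+1) ' ' ∧
         fila.toList.getD (i+1) ' ' = fila.toList.getD (i+2) ' ' ∧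
         fila.toList.getD (i+2) ' ' = fila.toList.getD (i+3) ' ' then c + 1 else c) c) contador
  -- vertical: build each column by concatenation, then scan it
  let contador := (List.range numColumnas).foldl (fun c i =>
    let columna := dna.foldl (fun acc fila => acc ++ [fila.toList.getD i ' ']) ([] : List Char)
    (List.range (numFilas - 3)).foldl (fun c j =>
      if columna.getD j ' ' = columna.getD (j+1) ' ' ∧
         columna.getD (j+1) ' ' = columna.getD (j+2) ' ' ∧
         columna.getD (j+2) ' ' = columna.getD (j+3) ' ' then c + 1 else c) c) contador
  -- diagonal left-to-right
  let contador := (List.range (numFilas - 3)).foldl (fun c i =>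
    (List.range (numColumnas - 3)).foldl (fun c j =>
      if (dna.getD i "").toList.getD j ' ' = (dna.getD (i+1) "").toList.getD (j+1) ' ' ∧
         (dna.getD (i+1) "").toList.getD (j+1) ' ' = (dna.getD (i+2) "").toList.getD (j+2) ' ' ∧
         (dna.getD (i+2) "").toList.getD (j+2) ' ' = (dna.getD (i+3) "").toList.getD (j+3) ' ' then c + 1 else c) c) contador
  -- diagonal right-to-left: j runs cols-1, cols-2, …, 3 (so j-3 ≥ 0 and .toNat is exact)
  let contador := (List.range (numFilas - 3)).foldl (fun c i =>
    (PySem.List.pyRange ((numColumnas : Int) - 1) 2 (-1)).foldl (fun c j =>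
      if (dna.getD i "").toList.getD j.toNat ' ' = (dna.getD (i+1) "").toList.getD (j-1).toNat ' ' ∧
         (dna.getD (i+1) "").toList.getD (j-1).toNat ' ' = (dna.getD (i+2) "").toList.getD (j-2).toNat ' ' ∧
         (dna.getD (i+2) "").toList.getD (j-2).toNat ' ' = (dna.getD (i+3) "").toList.getD (j-3).toNat ' ' then c + 1 else c) c) contador
  decide (contador > 1)

-- ===== PORT B =====
def isMutant_alt (dna : List String) : Bool :=
  let rows := dna.length
  let cols := (dna.headD "").length   -- len(dna[0]); dna ≠ [] under Pre_
  let dirs : List (Int × Int) := [(0,1),(1,0),(1,1),(1,-1)]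
  let count : Int := (List.range rows).foldl (fun c (i : Nat) =>
    (List.range cols).foldl (fun c (j : Nat) =>
      dirs.foldl (fun c d =>
        if 0 ≤ (i:Int) + 3*d.1 ∧ (i:Int) + 3*d.1 < (rows:Int) ∧
           0 ≤ (j:Int) + 3*d.2 ∧ (j:Int) + 3*d.2 < (cols:Int) then
          let ch := (dna.getD i "").toList.getD j ' '
          if ([(1:Int),2,3].all fun k =>
               (dna.getD ((i:Int)+k*d.1).toNat "").toList.getD ((j:Int)+k*d.2).toNat ' ' == ch) then
            c + 1
          else c
        else c) c) c) 0
  decide (count > 1)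

-- ===== PRECONDITION & SPEC =====
-- Pre_ excludes exactly the inputs where Python A raises IndexError: the empty list (dna[0])
-- and matrices where some row is shorter than the first row (column building indexes fila[i] for i < len(dna[0])).
def Pre_isMutant (dna : List String) : Prop :=
  dna ≠ [] ∧ ∀ s ∈ dna, (dna.headD "").length ≤ s.length
instance (dna : List String) : Decidable (Pre_isMutant dna) := by unfold Pre_isMutant; infer_instance

def pvWitness_isMutant : List String := ["ABCD", "ABCD", "ABCD", "ABCD"]

def Spec_isMutant (dna : List String) (out : Bool) : Prop := out = isMutant_alt dna
instance (dna : List String) (out : Bool) : Decidable (Spec_isMutant dna out) := by unfold Spec_isMutant; infer_instance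

-- ===== CLAIM (what is proved, stated in full; the proofs are below) =====
def Claim_equal_isMutant : Prop := ∀ (dna : List String), Dom_isMutant dna → Pre_isMutant dna → Spec_isMutant dna (isMutant dna)

-- ===== LEMMAS AND PROOFS =====

-- the character at row i, column j (default ' '), the access both ports perform
def gC (dna : List String) (i j : Nat) : Char := ((dna.getD i "").toList).getD j ' '

-- indicator of a 4-in-a-row window
def cnt4 (a b c d : Char) : Int := if a = b ∧ b = c ∧ c = d then 1 else 0

-- the canonical total count both ports compute
def T (dna : List String) : Int :=
  (∑ i ∈ Finset.range dna.length, ∑ j ∈ Finset.range ((dna.headD "").length - 3),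
      cnt4 (gC dna i j) (gC dna i (j+1)) (gC dna i (j+2)) (gC dna i (j+3)))
  + (∑ i ∈ Finset.range (dna.headD "").length, ∑ j ∈ Finset.range (dna.length - 3),
      cnt4 (gC dna j i) (gC dna (j+1) i) (gC dna (j+2) i) (gC dna (j+3) i))
  + (∑ i ∈ Finset.range (dna.length - 3), ∑ j ∈ Finset.range ((dna.headD "").length - 3),
      cnt4 (gC dna i j) (gC dna (i+1) (j+1)) (gC dna (i+2) (j+2)) (gC dna (i+3) (j+3)))
  + (∑ i ∈ Finset.range (dna.length - 3), ∑ k ∈ Finset.range ((dna.headD "").length - 3),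
      cnt4 (gC dna i (3+k)) (gC dna (i+1) (2+k)) (gC dna (i+2) (1+k)) (gC dna (i+3) k))

lemma countP_range_sum (n : Nat) (P : Nat → Prop) [DecidablePred P] :
    (((List.range n).countP (fun i => decide (P i)) : Nat) : Int)
      = ∑ i ∈ Finset.range n, (if P i then (1:Int) else 0) := by
  induction n with
  | zero => simp
  | succ n ih =>
    rw [List.range_succ, List.countP_append, Finset.sum_range_succ, ← ih]
    by_cases h : P n <;> simp [h]

lemma sum_map_range (n : Nat) (f : Nat → Int) :
    ((List.range n).map f).sum = ∑ i ∈ Finset.range n, f i := by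
  induction n with
  | zero => simp
  | succ n ih => rw [List.range_succ, Finset.sum_range_succ, ← ih]; simp

lemma sum_map_getD {α : Type} [Inhabited α] (l : List α) (h : α → Int) :
    (l.map h).sum = ∑ i ∈ Finset.range l.length, h (l.getD i default) := by
  induction l with
  | nil => simp
  | cons x xs ih =>
    rw [List.map_cons, List.sum_cons, List.length_cons, Finset.sum_range_succ', ih]
    simp [add_comm]

lemma sum_ite_ub (n m : Nat) (f : Nat → Int) :
    (∑ j ∈ Finset.range n, if j + m < n then f j else 0)
      = ∑ j ∈ Finset.range (n - m), f j := by
  have h1 : ∀ j ∈ Finset.range n, (if j + m < n then f j else 0)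
      = (if j ∈ Finset.range (n - m) then f j else 0) := by
    intro j hj
    refine if_congr ?_ rfl rfl
    simp only [Finset.mem_range] at *
    omega
  rw [Finset.sum_congr rfl h1, Finset.sum_ite_mem, Finset.range_inter_range,
      min_eq_right (Nat.sub_le n m)]

lemma sum_ite_lb (n m : Nat) (f : Nat → Int) :
    (∑ j ∈ Finset.range n, if m ≤ j then f j else 0)
      = ∑ k ∈ Finset.range (n - m), f (m + k) := by
  have h1 : ∀ j ∈ Finset.range n, (if m ≤ j then f j else 0)
      = (if j ∈ Finset.Ico m n then f j else 0) := by
    intro j hj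
    refine if_congr ?_ rfl rfl
    simp only [Finset.mem_range] at hj
    simp [Finset.mem_Ico, hj]
  rw [Finset.sum_congr rfl h1, Finset.sum_ite_mem,
      Finset.inter_eq_right.mpr (by intro j hj; simp only [Finset.mem_Ico] at hj; simpa using hj.2),
      Finset.sum_Ico_eq_sum_range]

lemma if_if_add (P Q : Prop) [Decidable P] [Decidable Q] (c : Int) :
    (if P then (if Q then c + 1 else c) else c) = c + (if P ∧ Q then 1 else 0) := by
  by_cases hP : P <;> by_cases hQ : Q <;> simp [hP, hQ]

lemma getD_map_lt {α β : Type} (l : List α) (f : α → β) (t : Nat) (d : β) (d' : α)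
    (h : t < l.length) : (l.map f).getD t d = f (l.getD t d') := by
  rw [List.getD_eq_getElem _ _ (by simpa using h), List.getD_eq_getElem _ _ h, List.getElem_map]

lemma blockH (dna : List String) (a : Int) :
    dna.foldl (fun c fila =>
      (List.range ((dna.headD "").length - 3)).foldl (fun c i =>
        if fila.toList.getD i ' ' = fila.toList.getD (i+1) ' ' ∧
           fila.toList.getD (i+1) ' ' = fila.toList.getD (i+2) ' ' ∧
           fila.toList.getD (i+2) ' ' = fila.toList.getD (i+3) ' ' then c + 1 else c) c) a
    = a + ∑ i ∈ Finset.range dna.length, ∑ j ∈ Finset.range ((dna.headD "").length - 3),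
        cnt4 (gC dna i j) (gC dna i (j+1)) (gC dna i (j+2)) (gC dna i (j+3)) := by
  rw [PySem.List.foldl_congr_mem dna _
      (fun c fila => c + (((List.range ((dna.headD "").length - 3)).countP
        (fun i => decide (fila.toList.getD i ' ' = fila.toList.getD (i+1) ' ' ∧
           fila.toList.getD (i+1) ' ' = fila.toList.getD (i+2) ' ' ∧
           fila.toList.getD (i+2) ' ' = fila.toList.getD (i+3) ' ')) : Nat) : Int)) a
      (by intro acc fila _; exact PySem.List.foldl_ite_add_one _ _ _),
    PySem.List.foldl_add, sum_map_getD]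
  congr 1
  refine Finset.sum_congr rfl (fun r _ => ?_)
  rw [countP_range_sum]
  rfl
lemma blockV (dna : List String) (a : Int) :
    (List.range (dna.headD "").length).foldl (fun c i =>
      let columna := dna.foldl (fun acc fila => acc ++ [fila.toList.getD i ' ']) ([] : List Char)
      (List.range (dna.length - 3)).foldl (fun c j =>
        if columna.getD j ' ' = columna.getD (j+1) ' ' ∧
           columna.getD (j+1) ' ' = columna.getD (j+2) ' ' ∧
           columna.getD (j+2) ' ' = columna.getD (j+3) ' ' then c + 1 else c) c) a
    = a + ∑ i ∈ Finset.range (dna.headD "").length, ∑ j ∈ Finset.range (dna.length - 3),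
        cnt4 (gC dna j i) (gC dna (j+1) i) (gC dna (j+2) i) (gC dna (j+3) i) := by
  rw [PySem.List.foldl_congr_mem _ _
      (fun c i => c + (((List.range (dna.length - 3)).countP
        (fun j => decide ((dna.map fun fila => fila.toList.getD i ' ').getD j ' ' = (dna.map fun fila => fila.toList.getD i ' ').getD (j+1) ' ' ∧
           (dna.map fun fila => fila.toList.getD i ' ').getD (j+1) ' ' = (dna.map fun fila => fila.toList.getD i ' ').getD (j+2) ' ' ∧
           (dna.map fun fila => fila.toList.getD i ' ').getD (j+2) ' ' = (dna.map fun fila => fila.toList.getD i ' ').getD (j+3) ' ')) : Nat) : Int)) a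
      (by intro acc i _
          dsimp only
          rw [PySem.List.foldl_append_singleton_eq_map, List.nil_append]
          exact PySem.List.foldl_ite_add_one _ _ _),
    PySem.List.foldl_add, sum_map_range]
  congr 1
  refine Finset.sum_congr rfl (fun i _ => ?_)
  rw [countP_range_sum]
  refine Finset.sum_congr rfl (fun j hj => ?_)
  simp only [Finset.mem_range] at hj
  rw [getD_map_lt _ _ j ' ' "" (by omega), getD_map_lt _ _ (j+1) ' ' "" (by omega),
      getD_map_lt _ _ (j+2) ' ' "" (by omega), getD_map_lt _ _ (j+3) ' ' "" (by omega)]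
  rfl
lemma blockD (dna : List String) (a : Int) :
    (List.range (dna.length - 3)).foldl (fun c i =>
      (List.range ((dna.headD "").length - 3)).foldl (fun c j =>
        if (dna.getD i "").toList.getD j ' ' = (dna.getD (i+1) "").toList.getD (j+1) ' ' ∧
           (dna.getD (i+1) "").toList.getD (j+1) ' ' = (dna.getD (i+2) "").toList.getD (j+2) ' ' ∧
           (dna.getD (i+2) "").toList.getD (j+2) ' ' = (dna.getD (i+3) "").toList.getD (j+3) ' ' then c + 1 else c) c) a
    = a + ∑ i ∈ Finset.range (dna.length - 3), ∑ j ∈ Finset.range ((dna.headD "").length - 3),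
        cnt4 (gC dna i j) (gC dna (i+1) (j+1)) (gC dna (i+2) (j+2)) (gC dna (i+3) (j+3)) := by
  rw [PySem.List.foldl_congr_mem _ _
      (fun c i => c + (((List.range ((dna.headD "").length - 3)).countP
        (fun j => decide ((dna.getD i "").toList.getD j ' ' = (dna.getD (i+1) "").toList.getD (j+1) ' ' ∧
           (dna.getD (i+1) "").toList.getD (j+1) ' ' = (dna.getD (i+2) "").toList.getD (j+2) ' ' ∧
           (dna.getD (i+2) "").toList.getD (j+2) ' ' = (dna.getD (i+3) "").toList.getD (j+3) ' ')) : Nat) : Int)) a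
      (by intro acc i _; exact PySem.List.foldl_ite_add_one _ _ _),
    PySem.List.foldl_add, sum_map_range]
  congr 1
  refine Finset.sum_congr rfl (fun i _ => ?_)
  rw [countP_range_sum]
  rfl

lemma blockX (dna : List String) (a : Int) :
    (List.range (dna.length - 3)).foldl (fun c i =>
      (PySem.List.pyRange (((dna.headD "").length : Int) - 1) 2 (-1)).foldl (fun c j =>
        if (dna.getD i "").toList.getD j.toNat ' ' = (dna.getD (i+1) "").toList.getD (j-1).toNat ' ' ∧
           (dna.getD (i+1) "").toList.getD (j-1).toNat ' ' = (dna.getD (i+2) "").toList.getD (j-2).toNat ' ' ∧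
           (dna.getD (i+2) "").toList.getD (j-2).toNat ' ' = (dna.getD (i+3) "").toList.getD (j-3).toNat ' ' then c + 1 else c) c) a
    = a + ∑ i ∈ Finset.range (dna.length - 3), ∑ k ∈ Finset.range ((dna.headD "").length - 3),
        cnt4 (gC dna i (3+k)) (gC dna (i+1) (2+k)) (gC dna (i+2) (1+k)) (gC dna (i+3) k) := by
  rw [PySem.List.foldl_congr_mem _ _
      (fun c i => c + (((PySem.List.pyRange (((dna.headD "").length : Int) - 1) 2 (-1)).countP
        (fun j => decide ((dna.getD i "").toList.getD j.toNat ' ' = (dna.getD (i+1) "").toList.getD (j-1).toNat ' ' ∧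
           (dna.getD (i+1) "").toList.getD (j-1).toNat ' ' = (dna.getD (i+2) "").toList.getD (j-2).toNat ' ' ∧
           (dna.getD (i+2) "").toList.getD (j-2).toNat ' ' = (dna.getD (i+3) "").toList.getD (j-3).toNat ' ')) : Nat) : Int)) a
      (by intro acc i _; exact PySem.List.foldl_ite_add_one _ _ _),
    PySem.List.foldl_add, sum_map_range]
  congr 1
  refine Finset.sum_congr rfl (fun i _ => ?_)
  have hrev : PySem.List.pyRange (((dna.headD "").length : Int) - 1) 2 (-1)
      = (PySem.List.pyRange 3 (((dna.headD "").length : Int))).reverse := by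
    rw [PySem.List.pyRange_neg_one_eq_reverse]
    norm_num
  rw [hrev, List.countP_reverse, PySem.List.pyRange_one, List.countP_map]
  have h3 : ((((dna.headD "").length : Int)) - 3).toNat = (dna.headD "").length - 3 := by omega
  rw [h3]
  simp only [Function.comp_def]
  rw [countP_range_sum]
  refine Finset.sum_congr rfl (fun k hk => ?_)
  have e0 : ((3:Int) + (k:Int)).toNat = 3 + k := by omega
  have e1 : ((3:Int) + (k:Int) - 1).toNat = 2 + k := by omega
  have e2 : ((3:Int) + (k:Int) - 2).toNat = 1 + k := by omega
  have e3 : ((3:Int) + (k:Int) - 3).toNat = k := by omega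
  rw [e0, e1, e2, e3]
  rfl


lemma dirEq1 (dna : List String) (i j : Nat) (hi : i < dna.length) :
    (if (0 ≤ (i:Int) + 3 * 0 ∧ (i:Int) + 3 * 0 < (dna.length:Int) ∧
         0 ≤ (j:Int) + 3 * 1 ∧ (j:Int) + 3 * 1 < ((dna.headD "").length:Int)) ∧
        (([1, 2, 3] : List Int).all fun k =>
          (dna.getD ((i:Int) + k * 0).toNat "").toList.getD ((j:Int) + k * 1).toNat ' ' ==
            (dna.getD i "").toList.getD j ' ') = true then (1:Int) else 0)
    = (if j + 3 < (dna.headD "").length then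
        cnt4 (gC dna i j) (gC dna i (j+1)) (gC dna i (j+2)) (gC dna i (j+3)) else 0) := by
  simp only [List.all_cons, List.all_nil, Bool.and_true, Bool.and_eq_true, beq_iff_eq]
  simp only [show ((i:Int) + 1 * 0).toNat = i from by omega,
             show ((i:Int) + 2 * 0).toNat = i from by omega,
             show ((i:Int) + 3 * 0).toNat = i from by omega,
             show ((j:Int) + 1 * 1).toNat = j + 1 from by omega,
             show ((j:Int) + 2 * 1).toNat = j + 2 from by omega,
             show ((j:Int) + 3 * 1).toNat = j + 3 from by omega]
  by_cases hb : j + 3 < (dna.headD "").length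
  · rw [if_pos hb]
    simp only [cnt4, gC]
    refine if_congr ?_ rfl rfl
    constructor
    · rintro ⟨-, e1, e2, e3⟩; simp_all
    · rintro ⟨e1, e2, e3⟩
      refine ⟨⟨by omega, by push_cast; omega, by omega, by push_cast; omega⟩, by simp_all⟩
  · rw [if_neg hb, if_neg]
    rintro ⟨⟨-, -, -, h4⟩, -⟩
    push_cast at h4
    omega

lemma dirEq2 (dna : List String) (i j : Nat) (hj : j < (dna.headD "").length) :
    (if (0 ≤ (i:Int) + 3 * 1 ∧ (i:Int) + 3 * 1 < (dna.length:Int) ∧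
         0 ≤ (j:Int) + 3 * 0 ∧ (j:Int) + 3 * 0 < ((dna.headD "").length:Int)) ∧
        (([1, 2, 3] : List Int).all fun k =>
          (dna.getD ((i:Int) + k * 1).toNat "").toList.getD ((j:Int) + k * 0).toNat ' ' ==
            (dna.getD i "").toList.getD j ' ') = true then (1:Int) else 0)
    = (if i + 3 < dna.length then
        cnt4 (gC dna i j) (gC dna (i+1) j) (gC dna (i+2) j) (gC dna (i+3) j) else 0) := by
  simp only [List.all_cons, List.all_nil, Bool.and_true, Bool.and_eq_true, beq_iff_eq]
  simp only [show ((j:Int) + 1 * 0).toNat = j from by omega,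
             show ((j:Int) + 2 * 0).toNat = j from by omega,
             show ((j:Int) + 3 * 0).toNat = j from by omega,
             show ((i:Int) + 1 * 1).toNat = i + 1 from by omega,
             show ((i:Int) + 2 * 1).toNat = i + 2 from by omega,
             show ((i:Int) + 3 * 1).toNat = i + 3 from by omega]
  by_cases hb : i + 3 < dna.length
  · rw [if_pos hb]
    simp only [cnt4, gC]
    refine if_congr ?_ rfl rfl
    constructor
    · rintro ⟨-, e1, e2, e3⟩; simp_all
    · rintro ⟨e1, e2, e3⟩
      refine ⟨⟨by omega, by push_cast; omega, by omega, by push_cast; omega⟩, by simp_all⟩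
  · rw [if_neg hb, if_neg]
    rintro ⟨⟨-, h2, -, -⟩, -⟩
    push_cast at h2
    omega

lemma dirEq3 (dna : List String) (i j : Nat) :
    (if (0 ≤ (i:Int) + 3 * 1 ∧ (i:Int) + 3 * 1 < (dna.length:Int) ∧
         0 ≤ (j:Int) + 3 * 1 ∧ (j:Int) + 3 * 1 < ((dna.headD "").length:Int)) ∧
        (([1, 2, 3] : List Int).all fun k =>
          (dna.getD ((i:Int) + k * 1).toNat "").toList.getD ((j:Int) + k * 1).toNat ' ' ==
            (dna.getD i "").toList.getD j ' ') = true then (1:Int) else 0)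
    = (if i + 3 < dna.length then
        (if j + 3 < (dna.headD "").length then
          cnt4 (gC dna i j) (gC dna (i+1) (j+1)) (gC dna (i+2) (j+2)) (gC dna (i+3) (j+3)) else 0)
       else 0) := by
  simp only [List.all_cons, List.all_nil, Bool.and_true, Bool.and_eq_true, beq_iff_eq]
  simp only [show ((i:Int) + 1 * 1).toNat = i + 1 from by omega,
             show ((i:Int) + 2 * 1).toNat = i + 2 from by omega,
             show ((i:Int) + 3 * 1).toNat = i + 3 from by omega,
             show ((j:Int) + 1 * 1).toNat = j + 1 from by omega,
             show ((j:Int) + 2 * 1).toNat = j + 2 from by omega,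
             show ((j:Int) + 3 * 1).toNat = j + 3 from by omega]
  by_cases hb1 : i + 3 < dna.length
  · rw [if_pos hb1]
    by_cases hb2 : j + 3 < (dna.headD "").length
    · rw [if_pos hb2]
      simp only [cnt4, gC]
      refine if_congr ?_ rfl rfl
      constructor
      · rintro ⟨-, e1, e2, e3⟩; simp_all
      · rintro ⟨e1, e2, e3⟩
        refine ⟨⟨by omega, by push_cast; omega, by omega, by push_cast; omega⟩, by simp_all⟩
    · rw [if_neg hb2, if_neg]
      rintro ⟨⟨-, -, -, h4⟩, -⟩
      push_cast at h4
      omega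
  · rw [if_neg hb1, if_neg]
    rintro ⟨⟨-, h2, -, -⟩, -⟩
    push_cast at h2
    omega

lemma dirEq4 (dna : List String) (i j : Nat) (hj : j < (dna.headD "").length) :
    (if (0 ≤ (i:Int) + 3 * 1 ∧ (i:Int) + 3 * 1 < (dna.length:Int) ∧
         0 ≤ (j:Int) + 3 * -1 ∧ (j:Int) + 3 * -1 < ((dna.headD "").length:Int)) ∧
        (([1, 2, 3] : List Int).all fun k =>
          (dna.getD ((i:Int) + k * 1).toNat "").toList.getD ((j:Int) + k * -1).toNat ' ' ==
            (dna.getD i "").toList.getD j ' ') = true then (1:Int) else 0)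
    = (if i + 3 < dna.length then
        (if 3 ≤ j then
          cnt4 (gC dna i j) (gC dna (i+1) (j-1)) (gC dna (i+2) (j-2)) (gC dna (i+3) (j-3)) else 0)
       else 0) := by
  simp only [List.all_cons, List.all_nil, Bool.and_true, Bool.and_eq_true, beq_iff_eq]
  by_cases hb1 : i + 3 < dna.length
  · rw [if_pos hb1]
    by_cases hb2 : 3 ≤ j
    · rw [if_pos hb2]
      simp only [show ((i:Int) + 1 * 1).toNat = i + 1 from by omega,
                 show ((i:Int) + 2 * 1).toNat = i + 2 from by omega,
                 show ((i:Int) + 3 * 1).toNat = i + 3 from by omega,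
                 show ((j:Int) + 1 * -1).toNat = j - 1 from by omega,
                 show ((j:Int) + 2 * -1).toNat = j - 2 from by omega,
                 show ((j:Int) + 3 * -1).toNat = j - 3 from by omega]
      simp only [cnt4, gC]
      refine if_congr ?_ rfl rfl
      constructor
      · rintro ⟨-, e1, e2, e3⟩; simp_all
      · rintro ⟨e1, e2, e3⟩
        refine ⟨⟨by omega, by push_cast; omega, by omega, by push_cast; omega⟩, by simp_all⟩
    · rw [if_neg hb2, if_neg]
      rintro ⟨⟨-, -, h3, -⟩, -⟩
      omega
  · rw [if_neg hb1, if_neg]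
    rintro ⟨⟨-, h2, -, -⟩, -⟩
    push_cast at h2
    omega

def F1 (dna : List String) (i j : Nat) : Int :=
  if j + 3 < (dna.headD "").length then
    cnt4 (gC dna i j) (gC dna i (j+1)) (gC dna i (j+2)) (gC dna i (j+3)) else 0
def F2 (dna : List String) (i j : Nat) : Int :=
  if i + 3 < dna.length then
    cnt4 (gC dna i j) (gC dna (i+1) j) (gC dna (i+2) j) (gC dna (i+3) j) else 0
def F3 (dna : List String) (i j : Nat) : Int :=
  if i + 3 < dna.length then
    (if j + 3 < (dna.headD "").length then
      cnt4 (gC dna i j) (gC dna (i+1) (j+1)) (gC dna (i+2) (j+2)) (gC dna (i+3) (j+3)) else 0)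
  else 0
def F4 (dna : List String) (i j : Nat) : Int :=
  if i + 3 < dna.length then
    (if 3 ≤ j then
      cnt4 (gC dna i j) (gC dna (i+1) (j-1)) (gC dna (i+2) (j-2)) (gC dna (i+3) (j-3)) else 0)
  else 0

lemma isMutant_alt_eq_T (dna : List String) : isMutant_alt dna = decide (T dna > 1) := by
  simp only [isMutant_alt]
  rw [PySem.List.foldl_congr_mem _ _
      (fun c (i : Nat) => c + ∑ j ∈ Finset.range (dna.headD "").length,
        (F1 dna i j + F2 dna i j + F3 dna i j + F4 dna i j)) 0
      (by
        intro acc i hi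
        rw [PySem.List.foldl_congr_mem _ _
            (fun c (j : Nat) => c + (F1 dna i j + F2 dna i j + F3 dna i j + F4 dna i j)) acc
            (by
              intro c j hj
              simp only [List.foldl_cons, List.foldl_nil]
              rw [if_if_add, if_if_add, if_if_add, if_if_add,
                  dirEq1 dna i j (List.mem_range.mp hi),
                  dirEq2 dna i j (List.mem_range.mp hj),
                  dirEq3 dna i j,
                  dirEq4 dna i j (List.mem_range.mp hj)]
              simp only [F1, F2, F3, F4]
              ring),
          PySem.List.foldl_add, sum_map_range]),
    PySem.List.foldl_add, sum_map_range, zero_add]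
  have hS1 : ∑ i ∈ Finset.range dna.length, ∑ j ∈ Finset.range (dna.headD "").length, F1 dna i j
      = ∑ i ∈ Finset.range dna.length, ∑ j ∈ Finset.range ((dna.headD "").length - 3),
          cnt4 (gC dna i j) (gC dna i (j+1)) (gC dna i (j+2)) (gC dna i (j+3)) :=
    Finset.sum_congr rfl (fun i _ => by simp only [F1]; exact sum_ite_ub _ 3 _)
  have hS2 : ∑ i ∈ Finset.range dna.length, ∑ j ∈ Finset.range (dna.headD "").length, F2 dna i j
      = ∑ i ∈ Finset.range (dna.headD "").length, ∑ j ∈ Finset.range (dna.length - 3),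
          cnt4 (gC dna j i) (gC dna (j+1) i) (gC dna (j+2) i) (gC dna (j+3) i) := by
    rw [Finset.sum_comm]
    exact Finset.sum_congr rfl (fun j _ => by simp only [F2]; exact sum_ite_ub _ 3 _)
  have hS3 : ∑ i ∈ Finset.range dna.length, ∑ j ∈ Finset.range (dna.headD "").length, F3 dna i j
      = ∑ i ∈ Finset.range (dna.length - 3), ∑ j ∈ Finset.range ((dna.headD "").length - 3),
          cnt4 (gC dna i j) (gC dna (i+1) (j+1)) (gC dna (i+2) (j+2)) (gC dna (i+3) (j+3)) := by
    have inner : ∀ i, ∑ j ∈ Finset.range (dna.headD "").length, F3 dna i j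
        = if i + 3 < dna.length then
            (∑ j ∈ Finset.range ((dna.headD "").length - 3),
              cnt4 (gC dna i j) (gC dna (i+1) (j+1)) (gC dna (i+2) (j+2)) (gC dna (i+3) (j+3)))
          else 0 := by
      intro i
      simp only [F3]
      by_cases h : i + 3 < dna.length
      · simp only [if_pos h]
        exact sum_ite_ub _ 3 _
      · simp [if_neg h]
    rw [Finset.sum_congr rfl (fun i _ => inner i)]
    exact sum_ite_ub _ 3 _
  have hS4 : ∑ i ∈ Finset.range dna.length, ∑ j ∈ Finset.range (dna.headD "").length, F4 dna i j
      = ∑ i ∈ Finset.range (dna.length - 3), ∑ k ∈ Finset.range ((dna.headD "").length - 3),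
          cnt4 (gC dna i (3+k)) (gC dna (i+1) (2+k)) (gC dna (i+2) (1+k)) (gC dna (i+3) k) := by
    have inner : ∀ i, ∑ j ∈ Finset.range (dna.headD "").length, F4 dna i j
        = if i + 3 < dna.length then
            (∑ k ∈ Finset.range ((dna.headD "").length - 3),
              cnt4 (gC dna i (3+k)) (gC dna (i+1) (2+k)) (gC dna (i+2) (1+k)) (gC dna (i+3) k))
          else 0 := by
      intro i
      simp only [F4]
      by_cases h : i + 3 < dna.length
      · simp only [if_pos h]
        rw [sum_ite_lb]
        refine Finset.sum_congr rfl (fun k _ => ?_)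
        rw [show 3 + k - 1 = 2 + k from by omega, show 3 + k - 2 = 1 + k from by omega,
            show 3 + k - 3 = k from by omega]
      · simp [if_neg h]
    rw [Finset.sum_congr rfl (fun i _ => inner i)]
    exact sum_ite_ub _ 3 _
  simp only [Finset.sum_add_distrib]
  rw [hS1, hS2, hS3, hS4]
  simp only [T]
  rfl

lemma isMutant_eq_T (dna : List String) : isMutant dna = decide (T dna > 1) := by
  simp only [isMutant]
  rw [blockH, blockV, blockD, blockX, zero_add]
  simp only [T]
  rfl


lemma ports_eq (dna : List String) : isMutant dna = isMutant_alt dna := by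
  rw [isMutant_eq_T, isMutant_alt_eq_T]

-- ===== VERDICT (by name: the statement is the Claim_ definition above) =====
theorem isMutant_spec : Claim_equal_isMutant := by
  intro dna _ _
  exact ports_eq dna
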